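-- pv_equiv track=rewrite | github.com/Zijian211/wildfireGPT | src/evaluation/utils.py | parse_current_entry
-- ===== SOURCE A (Python) =====
-- def parse_current_entry(entry, aspect):
--     return_list = []
--     if aspect == 'relevance':
--         for key in range(1, 7):
--             if f"relevance_feedback_q{key}" in entry.keys():
--                 return_list.append(entry[f"relevance_feedback_q{key}"])
--             else:
--                 return_list.append('Not Applicable')
--     elif aspect == 'accessibility':
--         for key in range(1, 4):
--             if f"accessibility_feedback_q{key}" in entry.keys():
--                 if key in [1, 3]:
--                     if entry[f"accessibility_feedback_q{key}"] == 'Yes':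
--                         return_list.append('No')
--                     elif entry[f"accessibility_feedback_q{key}"] == 'No':
--                         return_list.append('Yes')
--                     else:
--                         return_list.append(entry[f"accessibility_feedback_q{key}"])
--                 else:
--                     return_list.append(entry[f"accessibility_feedback_q{key}"])
--             else:
--                 return_list.append('Not Applicable')
--     elif aspect == 'entailment':
--         for key in range(1, 2):
--             if f"entailment_feedback_q{key}" in entry.keys():
--                 return_list.append(entry[f"entailment_feedback_q{key}"])
--             else:
--                 return_list.append('Not Applicable')
--
--     return return_list
-- ===== SOURCE B (Python) =====
-- # Inverted strategy: ONE pass over the entry indexes every matching key by its suffix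
-- # (no per-index membership lookups), then a constant-size assembly plus a separate flip pass.
-- _SIZES = {'relevance': 6, 'accessibility': 3, 'entailment': 1}
--
-- def parse_current_entry(entry, aspect):
--     n = _SIZES.get(aspect, 0)
--     prefix = aspect + '_feedback_q'
--     tails = {}
--     for k, v in entry.items():
--         if k.startswith(prefix):
--             tails.setdefault(k[len(prefix):], v)
--     out = [tails.get(str(i), 'Not Applicable') for i in range(1, n + 1)]
--     if aspect == 'accessibility':
--         for j in (0, 2):
--             if out[j] == 'Yes':
--                 out[j] = 'No'
--             elif out[j] == 'No':
--                 out[j] = 'Yes'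
--     return out
-- ===== Notes on version B (the rewrite author's own statement) =====
-- stated objective: alternative
-- what changed: Inverts the traversal: instead of A's per-aspect loops that probe the dict for each constructed key, B makes one pass over the entry itself, indexing every key that starts with the aspect prefix by its suffix, then assembles the fixed-size answer from that index and applies the accessibility Yes/No flip as a separate pass over positions 0 and 2.
import Mathlib
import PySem

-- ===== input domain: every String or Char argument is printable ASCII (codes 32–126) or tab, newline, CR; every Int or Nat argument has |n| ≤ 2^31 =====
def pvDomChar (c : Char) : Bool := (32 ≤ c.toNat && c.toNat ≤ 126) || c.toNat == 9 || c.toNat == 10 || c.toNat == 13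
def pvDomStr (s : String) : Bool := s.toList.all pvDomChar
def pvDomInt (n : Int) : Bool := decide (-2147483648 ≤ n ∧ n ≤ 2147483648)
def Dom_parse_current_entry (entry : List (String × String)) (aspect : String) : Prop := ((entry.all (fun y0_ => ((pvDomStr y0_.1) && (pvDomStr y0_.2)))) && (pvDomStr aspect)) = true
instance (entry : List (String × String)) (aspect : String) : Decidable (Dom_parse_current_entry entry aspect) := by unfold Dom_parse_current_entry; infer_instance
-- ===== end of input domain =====

-- B inverts A's traversal: one pass over the entry indexes every matching key by its suffix, then a
-- constant-size assembly and a separate flip pass replace A's per-index membership lookups (alternative, same cost).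

-- dict membership + lookup on the association list (first match = Python dict semantics under the type convention)
def pvLookup {α : Type} (d : List (String × α)) (k : String) : Option α :=
  (d.find? (fun p => p.1 == k)).map (·.2)

-- ===== PORT A =====
def parse_current_entry (entry : List (String × String)) (aspect : String) : List String :=
  let return_list : List String := []
  if aspect = "relevance" then
    (PySem.List.pyRange 1 7 1).foldl (fun rl key =>
      match pvLookup entry ("relevance_feedback_q" ++ PySem.Int.toStr key) with
      | some v => rl ++ [v]
      | none => rl ++ ["Not Applicable"]) return_list
  else if aspect = "accessibility" then
    (PySem.List.pyRange 1 4 1).foldl (fun rl key =>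
      match pvLookup entry ("accessibility_feedback_q" ++ PySem.Int.toStr key) with
      | some v =>
          if key ∈ ([1, 3] : List Int) then
            if v = "Yes" then rl ++ ["No"]
            else if v = "No" then rl ++ ["Yes"]
            else rl ++ [v]
          else rl ++ [v]
      | none => rl ++ ["Not Applicable"]) return_list
  else if aspect = "entailment" then
    (PySem.List.pyRange 1 2 1).foldl (fun rl key =>
      match pvLookup entry ("entailment_feedback_q" ++ PySem.Int.toStr key) with
      | some v => rl ++ [v]
      | none => rl ++ ["Not Applicable"]) return_list
  else return_list

-- ===== PORT B =====
def pvSizes : PySem.Dict String Int :=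
  PySem.Dict.ofList [("relevance", 6), ("accessibility", 3), ("entailment", 1)]

def parse_current_entry_alt (entry : List (String × String)) (aspect : String) : List String :=
  let n : Int := pvSizes.getD aspect 0
  let pref : String := aspect ++ "_feedback_q"
  let tails : PySem.Dict String String :=
    entry.foldl (fun d kv =>
      if PySem.Str.startswith kv.1 pref then
        d.setdefault (PySem.Str.slice kv.1 (some (PySem.Str.len pref)) none) kv.2
      else d) PySem.Dict.empty
  let out := (PySem.List.pyRange 1 (n + 1) 1).map
    (fun i => tails.getD (PySem.Int.toStr i) "Not Applicable")
  if aspect = "accessibility" then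
    ([0, 2] : List Nat).foldl (fun o j =>
      if o.getD j "" = "Yes" then o.set j "No"
      else if o.getD j "" = "No" then o.set j "Yes"
      else o) out
  else out

-- ===== PRECONDITION & SPEC =====
def Spec_parse_current_entry (entry : List (String × String)) (aspect : String) (out : List String) : Prop := out = parse_current_entry_alt entry aspect
instance (entry : List (String × String)) (aspect : String) (out : List String) : Decidable (Spec_parse_current_entry entry aspect out) := by unfold Spec_parse_current_entry; infer_instance

-- ===== CLAIM (what is proved, stated in full; the proofs are below) =====
def Claim_equal_parse_current_entry : Prop := ∀ (entry : List (String × String)) (aspect : String), Dom_parse_current_entry entry aspect → Spec_parse_current_entry entry aspect (parse_current_entry entry aspect)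

-- ===== LEMMAS AND PROOFS =====

-- a key that starts with `pre` is `pre` followed by its sliced tail
theorem pv_key_split (k pre : String) (h : PySem.Str.startswith k pre = true) :
    k = pre ++ PySem.Str.slice k (some (PySem.Str.len pre)) none := by
  rw [PySem.Str.startswith_eq, PySem.Chars.startswith_iff] at h
  obtain ⟨t, ht⟩ := h
  apply String.toList_inj.mp
  rw [String.toList_append, PySem.Str.toList_slice, PySem.Chars.slice_eq_listSlice,
    PySem.Str.len_eq, PySem.List.slice_from_natCast, ← ht, List.drop_left]

-- `pre ++ t` starts with `pre`
theorem pv_startswith_append (pre t : String) :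
    PySem.Str.startswith (pre ++ t) pre = true := by
  rw [PySem.Str.startswith_eq, PySem.Chars.startswith_iff, String.toList_append]
  exact List.prefix_append _ _

-- left cancellation for string append
theorem pv_append_left_cancel {pre s t : String} (h : pre ++ s = pre ++ t) : s = t := by
  apply String.toList_inj.mp
  have h2 := congrArg String.toList h
  rw [String.toList_append, String.toList_append] at h2
  exact List.append_cancel_left h2

-- the suffix-indexing fold looked up at t is the first entry whose key is pre ++ t
theorem pv_tails_get (pre : String) (entry : List (String × String))
    (d : PySem.Dict String String) (t : String) :
    ((entry.foldl (fun d kv =>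
        if PySem.Str.startswith kv.1 pre then
          d.setdefault (PySem.Str.slice kv.1 (some (PySem.Str.len pre)) none) kv.2
        else d) d).get? t)
      = (d.get? t).or ((entry.find? (fun p => p.1 == pre ++ t)).map (·.2)) := by
  induction entry generalizing d with
  | nil => simp
  | cons kv rest ih =>
    simp only [List.foldl_cons]
    by_cases hsw : PySem.Str.startswith kv.1 pre = true
    · rw [if_pos hsw]
      have hk := pv_key_split kv.1 pre hsw
      by_cases ht : t = PySem.Str.slice kv.1 (some (PySem.Str.len pre)) none
      · have hbeq : (fun p : String × String => p.1 == pre ++ t) kv = true := by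
          simp only [beq_iff_eq]; rw [hk, ht]
        rw [ih,
          List.find?_cons_of_pos (p := fun p : String × String => p.1 == pre ++ t)
            (a := kv) (l := rest) hbeq,
          ← ht, PySem.Dict.get?_setdefault_self]
        cases d.get? t <;> simp
      · have hbeq : ¬ ((fun p : String × String => p.1 == pre ++ t) kv = true) := by
          simp only [beq_iff_eq]
          rw [hk]; intro hc
          exact ht (pv_append_left_cancel hc).symm
        rw [ih,
          List.find?_cons_of_neg (p := fun p : String × String => p.1 == pre ++ t)
            (a := kv) (l := rest) hbeq,
          PySem.Dict.get?_setdefault_of_ne _ _ ht]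
    · rw [if_neg hsw]
      have hbeq : ¬ ((fun p : String × String => p.1 == pre ++ t) kv = true) := by
        simp only [beq_iff_eq]; intro hc
        exact hsw (hc ▸ pv_startswith_append pre t)
      rw [ih,
        List.find?_cons_of_neg (p := fun p : String × String => p.1 == pre ++ t)
          (a := kv) (l := rest) hbeq]

theorem pv_tails_getD (pre : String) (entry : List (String × String)) (t dflt : String) :
    ((entry.foldl (fun d kv =>
        if PySem.Str.startswith kv.1 pre then
          d.setdefault (PySem.Str.slice kv.1 (some (PySem.Str.len pre)) none) kv.2
        else d) PySem.Dict.empty).getD t dflt)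
      = ((entry.find? (fun p => p.1 == pre ++ t)).map (·.2)).getD dflt := by
  rw [PySem.Dict.getD_eq_get?_getD, pv_tails_get]
  simp

-- ===== VERDICT (by name: the statement is the Claim_ definition above) =====
theorem parse_current_entry_spec : Claim_equal_parse_current_entry := by
  intro entry aspect _
  unfold Spec_parse_current_entry parse_current_entry parse_current_entry_alt
  by_cases h1 : aspect = "relevance"
  · subst h1
    simp only [if_neg (by decide : ¬ ("relevance" : String) = "accessibility"),
      show (pvSizes.getD "relevance" 0 : Int) = 6 from by decide]
    rw [show PySem.List.pyRange 1 (6 + 1) 1 = [1, 2, 3, 4, 5, 6] from by decide,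
      show PySem.List.pyRange 1 7 1 = [1, 2, 3, 4, 5, 6] from by decide]
    simp only [List.foldl_cons, List.foldl_nil, List.map_cons, List.map_nil, List.nil_append,
      pv_tails_getD, pvLookup,
      show ("relevance" ++ "_feedback_q" : String) = "relevance_feedback_q" from rfl]
    cases (List.find? (fun p => p.1 == "relevance_feedback_q" ++ PySem.Int.toStr 1) entry) <;>
    cases (List.find? (fun p => p.1 == "relevance_feedback_q" ++ PySem.Int.toStr 2) entry) <;>
    cases (List.find? (fun p => p.1 == "relevance_feedback_q" ++ PySem.Int.toStr 3) entry) <;>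
    cases (List.find? (fun p => p.1 == "relevance_feedback_q" ++ PySem.Int.toStr 4) entry) <;>
    cases (List.find? (fun p => p.1 == "relevance_feedback_q" ++ PySem.Int.toStr 5) entry) <;>
    cases (List.find? (fun p => p.1 == "relevance_feedback_q" ++ PySem.Int.toStr 6) entry) <;>
    simp
  · by_cases h2 : aspect = "accessibility"
    · subst h2
      simp only [if_neg h1,
        show (pvSizes.getD "accessibility" 0 : Int) = 3 from by decide]
      rw [show PySem.List.pyRange 1 (3 + 1) 1 = [1, 2, 3] from by decide,
        show PySem.List.pyRange 1 4 1 = [1, 2, 3] from by decide]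
      simp only [List.foldl_cons, List.foldl_nil, List.map_cons, List.map_nil, List.nil_append,
        pv_tails_getD, pvLookup,
        show ("accessibility" ++ "_feedback_q" : String) = "accessibility_feedback_q" from rfl]
      cases (List.find? (fun p => p.1 == "accessibility_feedback_q" ++ PySem.Int.toStr 1) entry) <;>
      cases (List.find? (fun p => p.1 == "accessibility_feedback_q" ++ PySem.Int.toStr 2) entry) <;>
      cases (List.find? (fun p => p.1 == "accessibility_feedback_q" ++ PySem.Int.toStr 3) entry) <;>
      simp only [Option.map_some, Option.getD_some,
        List.getD_cons_zero, List.set_cons_zero] <;>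
      norm_num <;> split_ifs <;> simp_all
    · by_cases h3 : aspect = "entailment"
      · subst h3
        simp only [if_neg h1, if_neg h2,
          show (pvSizes.getD "entailment" 0 : Int) = 1 from by decide]
        rw [show PySem.List.pyRange 1 (1 + 1) 1 = [1] from by decide,
          show PySem.List.pyRange 1 2 1 = [1] from by decide]
        simp only [List.foldl_cons, List.foldl_nil, List.map_cons, List.map_nil, List.nil_append,
          pv_tails_getD, pvLookup,
          show ("entailment" ++ "_feedback_q" : String) = "entailment_feedback_q" from rfl]
        cases (List.find? (fun p => p.1 == "entailment_feedback_q" ++ PySem.Int.toStr 1) entry) <;>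
        simp
      · have hmk : pvSizes = PySem.Dict.mk [("relevance", 6), ("accessibility", 3), ("entailment", 1)] := by decide
        have hz : pvSizes.getD aspect 0 = 0 := by
          simp [hmk, PySem.Dict.getD_eq_get?_getD, PySem.Dict.get?,
            Ne.symm h1, Ne.symm h2, Ne.symm h3]
        simp only [if_neg h1, if_neg h2, if_neg h3, hz]
        rw [show PySem.List.pyRange 1 (0 + 1) 1 = [] from by decide]
        simp
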